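-- pv_equiv track=rewrite | github.com/lanxjng/Python | onThi.py | tongBinhPhuong
-- ===== SOURCE A (Python) =====
-- def tongBinhPhuong(n):
--     if n < 0:
--         return False
--     else:
--         s = 0
--         for i in range(1, n):
--             s += (n % 10)**2
--             n //= 10
--     return s
-- ===== SOURCE B (Python) =====
-- def tongBinhPhuong(n):
--     if n < 0:
--         return False
--     s = 0
--     while n > 0:
--         s += (n % 10) ** 2
--         n //= 10
--     return s
-- ===== Notes on version B (the rewrite author's own statement) =====
-- stated objective: faster
-- what changed: Replaces A's for-loop over range(1, n) (n-1 iterations, almost all adding 0 once n has been divided down to 0) with a while n > 0 loop that stops after one iteration per digit.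
-- intended difference: At n = 1 A's loop range(1, n) is empty so A returns 0, while B returns 1, the sum of the squares of the digits of 1, which is the intended value. — e.g. on tongBinhPhuong(1): A returns 0, B returns 1
-- outside the precondition, e.g. on tongBinhPhuong(-3): A returns False, B returns False
import Mathlib
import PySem

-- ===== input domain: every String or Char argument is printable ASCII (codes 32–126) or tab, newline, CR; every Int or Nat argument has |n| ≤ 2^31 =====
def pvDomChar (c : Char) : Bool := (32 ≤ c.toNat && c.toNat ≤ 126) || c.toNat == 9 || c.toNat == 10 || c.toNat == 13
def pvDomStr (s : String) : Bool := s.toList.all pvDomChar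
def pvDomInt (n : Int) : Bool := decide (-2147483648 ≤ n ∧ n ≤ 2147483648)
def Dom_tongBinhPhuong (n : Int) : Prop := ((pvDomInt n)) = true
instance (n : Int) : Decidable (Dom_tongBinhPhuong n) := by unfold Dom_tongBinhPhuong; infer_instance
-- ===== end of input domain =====

-- B replaces A's O(n) for-loop over range(1, n) by a while n > 0 loop over the digits (O(log n)).

-- ===== PORT A =====
-- for i in range(1, n): s += (n % 10)**2; n //= 10   — folded over the range with state (s, n)
def tongBinhPhuong (n : Int) : Int :=
  if n < 0 then 0  -- Python returns False (not an int) here; excluded by Pre_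
  else
    ((PySem.List.pyRange 1 n 1).foldl
      (fun (p : Int × Int) _ =>
        (p.1 + (PySem.Int.mod p.2 10) ^ 2, PySem.Int.floordiv p.2 10)) (0, n)).1

-- ===== PORT B =====
-- while n > 0: s += (n % 10)**2; n //= 10
def tbLoop (s n : Int) : Int :=
  if 0 < n then
    tbLoop (s + (PySem.Int.mod n 10) ^ 2) (PySem.Int.floordiv n 10)
  else s
termination_by n.toNat
decreasing_by
  rw [PySem.Int.floordiv_eq_ediv_of_pos (by omega : (0:Int) < 10)]
  omega

def tongBinhPhuong_alt (n : Int) : Int :=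
  if n < 0 then 0  -- Python returns False (not an int) here; excluded by Pre_
  else tbLoop 0 n

-- ===== PRECONDITION & SPEC =====
-- Pre_ excludes n < 0, where A returns False — a bool, not a value of the declared Int type.
def Pre_tongBinhPhuong (n : Int) : Prop := 0 ≤ n
instance (n : Int) : Decidable (Pre_tongBinhPhuong n) := by unfold Pre_tongBinhPhuong; infer_instance
def pvWitness_tongBinhPhuong : Int := 123

-- At n = 1 A's loop range(1, n) is empty so A returns 0, while B returns 1,
-- the sum of the squares of the digits of 1, which is the intended value.
def D_tongBinhPhuong (n : Int) : Prop := n = 1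
instance (n : Int) : Decidable (D_tongBinhPhuong n) := by unfold D_tongBinhPhuong; infer_instance

def Spec_tongBinhPhuong (n : Int) (out : Int) : Prop := ¬ D_tongBinhPhuong n → out = tongBinhPhuong_alt n
instance (n : Int) (out : Int) : Decidable (Spec_tongBinhPhuong n out) := by unfold Spec_tongBinhPhuong; infer_instance

def pvDiffWitness_tongBinhPhuong : Int := 1
def pvDiffWitnessOut_tongBinhPhuong : Int × Int := (0, 1)

-- ===== CLAIM (what is proved, stated in full; the proofs are below) =====
def Claim_unchanged_tongBinhPhuong : Prop := ∀ (n : Int), Dom_tongBinhPhuong n → Pre_tongBinhPhuong n → Spec_tongBinhPhuong n (tongBinhPhuong n)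
def Claim_changed_tongBinhPhuong : Prop := Dom_tongBinhPhuong (pvDiffWitness_tongBinhPhuong) ∧ Pre_tongBinhPhuong (pvDiffWitness_tongBinhPhuong) ∧ D_tongBinhPhuong (pvDiffWitness_tongBinhPhuong) ∧ tongBinhPhuong (pvDiffWitness_tongBinhPhuong) = pvDiffWitnessOut_tongBinhPhuong.1 ∧ tongBinhPhuong_alt (pvDiffWitness_tongBinhPhuong) = pvDiffWitnessOut_tongBinhPhuong.2 ∧ pvDiffWitnessOut_tongBinhPhuong.1 ≠ pvDiffWitnessOut_tongBinhPhuong.2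
def Claim_exact_tongBinhPhuong : Prop := ∀ (n : Int), Dom_tongBinhPhuong n → Pre_tongBinhPhuong n → D_tongBinhPhuong n → tongBinhPhuong n ≠ tongBinhPhuong_alt n

-- ===== LEMMAS AND PROOFS =====

-- Once the loop state has reached n = 0, A's remaining iterations do nothing.
theorem tb_fold_zero (l : List Int) (s : Int) :
    l.foldl (fun (p : Int × Int) _ =>
        (p.1 + (PySem.Int.mod p.2 10) ^ 2, PySem.Int.floordiv p.2 10)) (s, 0) = (s, 0) := by
  induction l generalizing s with
  | nil => rfl
  | cons x l ih =>
      simp only [List.foldl_cons]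
      have h1 : PySem.Int.mod 0 10 = 0 := by decide
      have h2 : PySem.Int.floordiv 0 10 = 0 := by decide
      rw [h1, h2]; simpa using ih s

-- A's fold agrees with B's while-loop as soon as the list is long enough (m < 10^length).
theorem tb_fold_eq_loop (l : List Int) (s m : Int) (hm : 0 ≤ m)
    (hlen : m < (10 : Int) ^ l.length) :
    (l.foldl (fun (p : Int × Int) _ =>
        (p.1 + (PySem.Int.mod p.2 10) ^ 2, PySem.Int.floordiv p.2 10)) (s, m)).1
      = tbLoop s m := by
  induction l generalizing s m with
  | nil =>
      have h : m = 0 := by simp at hlen; omega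
      subst h
      rw [tbLoop]; simp
  | cons x l ih =>
      rcases eq_or_lt_of_le hm with h0 | h0
      · rw [← h0, tb_fold_zero, tbLoop]; simp
      · rw [tbLoop]
        simp only [if_pos h0, List.foldl_cons]
        have hdiv : PySem.Int.floordiv m 10 = m / 10 :=
          PySem.Int.floordiv_eq_ediv_of_pos (by omega)
        apply ih
        · rw [hdiv]; omega
        · rw [hdiv]
          have hp : (10 : Int) ^ (x :: l).length = 10 * (10 : Int) ^ l.length := by
            simp [pow_succ]; ring
          rw [hp] at hlen
          omega

theorem ten_pow_big (k : Nat) : (k : Int) + 3 ≤ (10 : Int) ^ (k + 1) := by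
  induction k with
  | zero => norm_num
  | succ k ih =>
      have hp : (10 : Int) ^ (k + 2) = 10 * (10 : Int) ^ (k + 1) := by ring
      push_cast
      push_cast at ih
      omega

-- ===== VERDICT (by name: the statement is the Claim_ definition above) =====
theorem tongBinhPhuong_spec : Claim_unchanged_tongBinhPhuong := by
  intro n hdom hpre hnd
  unfold Pre_tongBinhPhuong at hpre
  unfold D_tongBinhPhuong at hnd
  unfold tongBinhPhuong tongBinhPhuong_alt
  rw [if_neg (by omega), if_neg (by omega)]
  apply tb_fold_eq_loop _ _ _ hpre
  rw [PySem.List.length_pyRange_one]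
  rcases eq_or_lt_of_le hpre with h0 | h0
  · rw [← h0]; norm_num
  · have h2 : 2 ≤ n := by omega
    have hk : ((n - 1).toNat : Int) = n - 1 := by omega
    have := ten_pow_big ((n - 1).toNat - 1)
    have hs : (n - 1).toNat - 1 + 1 = (n - 1).toNat := by omega
    rw [hs] at this
    omega

theorem tbA_one : tongBinhPhuong 1 = 0 := by
  unfold tongBinhPhuong
  rw [if_neg (by omega), PySem.List.pyRange_one_eq_nil (by omega)]
  rfl

theorem tbB_one : tongBinhPhuong_alt 1 = 1 := by
  unfold tongBinhPhuong_alt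
  rw [if_neg (by omega), tbLoop]
  norm_num
  rw [tbLoop]
  norm_num

theorem tongBinhPhuong_changed : Claim_changed_tongBinhPhuong := by
  unfold Claim_changed_tongBinhPhuong
  refine ⟨by decide, by decide, by decide, tbA_one, tbB_one, by decide⟩

theorem tongBinhPhuong_tight : Claim_exact_tongBinhPhuong := by
  intro n _ _ hd
  unfold D_tongBinhPhuong at hd
  subst hd
  rw [tbA_one, tbB_one]
  decide
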